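-- pv_equiv track=rewrite | github.com/michelleduong03/TIP-Course | TIP-102/Recursion/session2.py | count_checked_in_passengers
-- ===== SOURCE A (Python) =====
-- def count_checked_in_passengers(rooms):
--     left, right = 0, len(rooms) - 1
--
--     while left <= right:
--         mid = (left + right) // 2
--         if rooms[mid] == 0:
--             left = mid + 1
--         else:
--             right = mid - 1
--
--     return len(rooms) - left
-- ===== SOURCE B (Python) =====
-- def count_checked_in_passengers(rooms):
--     # Recursion on list slices instead of an index-pair loop: the midpoint of a
--     # window [l, r] is l + (size-1)//2, so the same probe path is followed.
--     if not rooms: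
--         return 0
--     m = (len(rooms) - 1) // 2
--     if rooms[m] == 0:
--         return count_checked_in_passengers(rooms[m + 1:])
--     return (len(rooms) - m) + count_checked_in_passengers(rooms[:m])
-- ===== Notes on version B (the rewrite author's own statement) =====
-- stated objective: alternative
-- what changed: A's iterative binary search over an (left, right) index pair with a final len - left subtraction is replaced by structural recursion on list slices: the middle element of the current slice is probed, and the count is accumulated additively ((len - m) + recurse on the prefix, or recurse on the suffix), with no index arithmetic against the original array; the probe path is identical since the window midpoint (l+r)//2 equals l + (size-1)//2.
import Mathlib
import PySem

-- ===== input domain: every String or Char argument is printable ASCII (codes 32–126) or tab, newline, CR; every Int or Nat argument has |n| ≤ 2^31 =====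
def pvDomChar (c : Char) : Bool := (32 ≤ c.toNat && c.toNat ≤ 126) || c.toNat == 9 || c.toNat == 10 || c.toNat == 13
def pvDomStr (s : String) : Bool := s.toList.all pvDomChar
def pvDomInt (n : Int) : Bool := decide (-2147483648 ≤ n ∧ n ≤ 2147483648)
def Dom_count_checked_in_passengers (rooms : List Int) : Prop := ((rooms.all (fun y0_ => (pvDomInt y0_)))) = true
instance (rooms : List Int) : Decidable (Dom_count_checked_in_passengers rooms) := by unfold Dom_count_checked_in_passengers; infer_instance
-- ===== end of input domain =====

-- B replaces A's iterative (left,right)-index binary-search loop by structural recursion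
-- on list slices with an additive accumulation; objective: alternative decomposition.

-- ===== PORT A =====
-- while left <= right: mid = (left+right)//2; branch on rooms[mid]; the loop's result is left.
-- fuel only makes the loop structural; rooms.length + 1 iterations always suffice (the window
-- shrinks every step), so the 0-fuel default is unreachable.
def pvALoop (rooms : List Int) (fuel : Nat) (left right : Int) : Int :=
  match fuel with
  | 0 => left
  | fuel + 1 =>
    if left ≤ right then
      let mid := PySem.Int.floordiv (left + right) 2
      if (PySem.List.pyGet? rooms mid).getD 0 = 0 then
        pvALoop rooms fuel (mid + 1) right
      else
        pvALoop rooms fuel left (mid - 1)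
    else left

def count_checked_in_passengers (rooms : List Int) : Int :=
  (rooms.length : Int) - pvALoop rooms (rooms.length + 1) 0 ((rooms.length : Int) - 1)

-- ===== PORT B =====
-- recursion on slices: probe the middle element m = (len-1)//2 (always in range, so List.getD
-- is exact for rooms[m]); recurse on rooms[m+1:] or count (len - m) plus the recursion on rooms[:m].
def count_checked_in_passengers_alt (rooms : List Int) : Int :=
  if h : rooms = [] then 0
  else
    let m := (rooms.length - 1) / 2
    if rooms.getD m 0 = 0 then
      count_checked_in_passengers_alt (rooms.drop (m + 1))
    else
      ((rooms.length : Int) - (m : Int)) + count_checked_in_passengers_alt (rooms.take m)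
termination_by rooms.length
decreasing_by
  · have : 0 < rooms.length := List.length_pos_iff.mpr h
    simp [List.length_drop]; omega
  · have : 0 < rooms.length := List.length_pos_iff.mpr h
    simp [List.length_take]; omega

-- ===== PRECONDITION & SPEC =====
def Spec_count_checked_in_passengers (rooms : List Int) (out : Int) : Prop := out = count_checked_in_passengers_alt rooms
instance (rooms : List Int) (out : Int) : Decidable (Spec_count_checked_in_passengers rooms out) := by unfold Spec_count_checked_in_passengers; infer_instance

-- ===== CLAIM (what is proved, stated in full; the proofs are below) =====
def Claim_equal_count_checked_in_passengers : Prop := ∀ (rooms : List Int), Dom_count_checked_in_passengers rooms → Spec_count_checked_in_passengers rooms (count_checked_in_passengers rooms)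

-- ===== LEMMAS AND PROOFS =====

-- The midpoint of the window [l, l+n-1] is l + (n-1)/2.
theorem pv_mid_eq (l n : Nat) (hn : 1 ≤ n) :
    PySem.Int.floordiv ((l : Int) + ((l : Int) + n - 1)) 2 = ((l : Int) + ((n - 1) / 2 : Nat)) := by
  rw [PySem.Int.floordiv_eq_iff_of_pos (by omega)]
  have hm : ((n - 1) / 2) * 2 ≤ n - 1 ∧ n - 1 < ((n - 1) / 2) * 2 + 2 := by omega
  push_cast
  omega

-- Main invariant: on the window [l, l+n-1] (inside the array, enough fuel),
-- A's loop and B's slice recursion agree.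
theorem pv_key (xs : List Int) (n : Nat) : ∀ (fuel l : Nat), n + 1 ≤ fuel → l + n ≤ xs.length →
    ((l : Int) + n) - pvALoop xs fuel l ((l : Int) + n - 1)
      = count_checked_in_passengers_alt ((xs.drop l).take n) := by
  induction n using Nat.strong_induction_on with
  | _ n ih =>
    intro fuel l hfuel hlen
    obtain ⟨f, rfl⟩ : ∃ f, fuel = f + 1 := ⟨fuel - 1, by omega⟩
    rcases Nat.eq_zero_or_pos n with hn | hn
    · subst hn
      simp only [pvALoop]
      rw [if_neg (by omega)]
      simp [count_checked_in_passengers_alt]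
    · -- window nonempty
      set w : List Int := (xs.drop l).take n with hw
      have hwlen : w.length = n := by
        simp [hw, List.length_take, List.length_drop]; omega
      have hwne : w ≠ [] := by
        intro h; rw [h] at hwlen; simp at hwlen; omega
      set m : Nat := (n - 1) / 2 with hm
      have hmn : m ≤ n - 1 := by omega
      -- the probed element is the same on both sides
      have hget : (PySem.List.pyGet? xs ((l : Int) + (m : Nat))).getD 0 = w.getD m 0 := by
        have h1 : ((l : Int) + (m : Nat)) = ((l + m : Nat) : Int) := by push_cast; ring
        rw [h1, PySem.List.pyGet?_natCast]
        have h2 : w[m]? = xs[l + m]? := by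
          rw [hw, List.getElem?_take_of_lt (by omega), List.getElem?_drop]
        simp [List.getD, h2]
      -- unfold A one step
      simp only [pvALoop]
      rw [if_pos (by omega), pv_mid_eq l n hn, hget]
      -- unfold B one step
      rw [show count_checked_in_passengers_alt w
            = if w.getD ((w.length - 1) / 2) 0 = 0 then
                count_checked_in_passengers_alt (w.drop ((w.length - 1) / 2 + 1))
              else ((w.length : Int) - (((w.length - 1) / 2 : Nat) : Int))
                    + count_checked_in_passengers_alt (w.take ((w.length - 1) / 2)) from by
            rw [count_checked_in_passengers_alt]; simp [hwne]]
      rw [hwlen, ← hm]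
      by_cases hz : w.getD m 0 = 0
      · rw [if_pos hz, if_pos hz]
        have hdrop : w.drop (m + 1) = (xs.drop (l + (m + 1))).take (n - (m + 1)) := by
          rw [hw, List.drop_take, List.drop_drop]
        rw [hdrop]
        have := ih (n - (m + 1)) (by omega) f (l + (m + 1)) (by omega) (by omega)
        have harg1 : ((l : Int) + (m : Nat)) + 1 = ((l + (m + 1) : Nat) : Int) := by push_cast; ring
        have harg2 : (l : Int) + n - 1 = ((l + (m + 1) : Nat) : Int) + ((n - (m + 1) : Nat) : Int) - 1 := by
          push_cast; omega
        rw [harg1, harg2, ← this]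
        push_cast
        omega
      · rw [if_neg hz, if_neg hz]
        have htake : w.take m = (xs.drop l).take m := by
          rw [hw, List.take_take, min_eq_left (by omega)]
        rw [htake]
        have := ih m (by omega) f l (by omega) (by omega)
        rw [← this]
        ring

-- ===== VERDICT (by name: the statement is the Claim_ definition above) =====
theorem count_checked_in_passengers_spec : Claim_equal_count_checked_in_passengers := by
  intro rooms _
  unfold Spec_count_checked_in_passengers count_checked_in_passengers
  have := pv_key rooms rooms.length (rooms.length + 1) 0 (by omega) (by omega)
  simp only [Nat.cast_zero, zero_add, List.drop_zero, List.take_length] at this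
  omega
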